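-- pv_equiv track=rewrite | github.com/MCFELA123/image-classify | backend/models/explainable_ai.py | _summarize_factors
-- ===== SOURCE A (Python) =====
-- from typing import Dict, Any, List, Optional, Tuple
--
-- def _summarize_factors(factors: List[Dict]) -> str:
--     """Summarize factor contributions"""
--     positive = sum(1 for f in factors if f['contribution'] == 'positive')
--     negative = sum(1 for f in factors if f['contribution'] == 'negative')
--
--     if positive > negative:
--         return "The quality assessment is predominantly positive based on the analyzed factors."
--     elif negative > positive:
--         return "Several factors negatively impacted the quality assessment."
--     else:
--         return "The assessment shows mixed results across different quality factors."
-- ===== SOURCE B (Python) =====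
-- def _summarize_factors(factors):
--     """Summarize factor contributions"""
--     WEIGHT = {'positive': 1, 'negative': -1}
--     MESSAGES = {
--         1: "The quality assessment is predominantly positive based on the analyzed factors.",
--         -1: "Several factors negatively impacted the quality assessment.",
--         0: "The assessment shows mixed results across different quality factors.",
--     }
--     score = sum(WEIGHT.get(f['contribution'], 0) for f in factors)
--     sign = (score > 0) - (score < 0)
--     return MESSAGES[sign]
-- ===== Notes on version B (the rewrite author's own statement) =====
-- stated objective: alternative
-- what changed: Replaces A's two counting passes and if/elif message chain with a table-driven formulation: one weight-table lookup mapped and summed into a signed score, and the message selected by indexing a message table with the arithmetic sign of the score (no branches).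
import Mathlib
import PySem

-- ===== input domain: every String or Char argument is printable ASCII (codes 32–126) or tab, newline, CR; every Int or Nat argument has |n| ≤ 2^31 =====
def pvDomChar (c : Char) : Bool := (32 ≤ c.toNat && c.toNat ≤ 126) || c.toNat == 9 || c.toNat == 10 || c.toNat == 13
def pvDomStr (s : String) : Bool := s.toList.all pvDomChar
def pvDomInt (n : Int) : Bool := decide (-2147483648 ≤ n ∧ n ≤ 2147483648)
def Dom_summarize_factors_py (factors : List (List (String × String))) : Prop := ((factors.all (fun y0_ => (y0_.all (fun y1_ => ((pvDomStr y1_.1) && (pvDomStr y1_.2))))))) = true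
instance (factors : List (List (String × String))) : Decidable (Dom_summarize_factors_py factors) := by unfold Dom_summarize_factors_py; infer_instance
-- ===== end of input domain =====

-- B is table-driven: a weight dict mapped and summed into one signed score, and the message picked by indexing a message table with the score's sign (no if/elif chain); same KeyError behaviour on a missing 'contribution' key (excluded by Pre_).

-- ===== PORT A =====
def summarize_factors_py (factors : List (List (String × String))) : String :=
  let positive := factors.foldl
    (fun acc f => if PySem.Dict.getD (PySem.Dict.mk f) "contribution" "" == "positive" then acc + 1 else acc) (0 : Int)
  let negative := factors.foldl
    (fun acc f => if PySem.Dict.getD (PySem.Dict.mk f) "contribution" "" == "negative" then acc + 1 else acc) (0 : Int)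
  if positive > negative then
    "The quality assessment is predominantly positive based on the analyzed factors."
  else if negative > positive then
    "Several factors negatively impacted the quality assessment."
  else
    "The assessment shows mixed results across different quality factors."

-- ===== PORT B =====
def pvWeight : PySem.Dict String Int := PySem.Dict.mk [("positive", 1), ("negative", -1)]
def pvMessages : PySem.Dict Int String := PySem.Dict.mk
  [(1, "The quality assessment is predominantly positive based on the analyzed factors."),
   (-1, "Several factors negatively impacted the quality assessment."),
   (0, "The assessment shows mixed results across different quality factors.")]

def summarize_factors_py_alt (factors : List (List (String × String))) : String :=
  let score := (factors.map (fun f =>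
    PySem.Dict.getD pvWeight (PySem.Dict.getD (PySem.Dict.mk f) "contribution" "") 0)).sum
  let sign : Int := (if score > 0 then 1 else 0) - (if score < 0 then 1 else 0)
  PySem.Dict.getD pvMessages sign ""

-- ===== PRECONDITION & SPEC =====
-- Pre_ excludes exactly the inputs where Python raises KeyError: a factor dict without the key 'contribution'.
def Pre_summarize_factors_py (factors : List (List (String × String))) : Prop :=
  (factors.all (fun f => (PySem.Dict.get? (PySem.Dict.mk f) "contribution").isSome)) = true
instance (factors : List (List (String × String))) : Decidable (Pre_summarize_factors_py factors) := by unfold Pre_summarize_factors_py; infer_instance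
def pvWitness_summarize_factors_py : (List (List (String × String))) := [[("contribution", "positive")], [("contribution", "neutral")]]
def Spec_summarize_factors_py (factors : List (List (String × String))) (out : String) : Prop := out = summarize_factors_py_alt factors
instance (factors : List (List (String × String))) (out : String) : Decidable (Spec_summarize_factors_py factors out) := by unfold Spec_summarize_factors_py; infer_instance

-- ===== CLAIM (what is proved, stated in full; the proofs are below) =====
def Claim_equal_summarize_factors_py : Prop := ∀ (factors : List (List (String × String))), Dom_summarize_factors_py factors → Pre_summarize_factors_py factors → Spec_summarize_factors_py factors (summarize_factors_py factors)

-- ===== LEMMAS AND PROOFS =====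

-- B's summed weights equal A's positive count minus A's negative count (generalized over A's accumulators).
lemma weights_eq_counts (factors : List (List (String × String))) (p n : Int) :
    p - n + (factors.map (fun f =>
      PySem.Dict.getD pvWeight (PySem.Dict.getD (PySem.Dict.mk f) "contribution" "") 0)).sum
    = factors.foldl
        (fun acc f => if PySem.Dict.getD (PySem.Dict.mk f) "contribution" "" == "positive" then acc + 1 else acc) p
      - factors.foldl
        (fun acc f => if PySem.Dict.getD (PySem.Dict.mk f) "contribution" "" == "negative" then acc + 1 else acc) n := by
  induction factors generalizing p n with
  | nil => simp
  | cons f fs ih =>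
    simp only [List.map_cons, List.sum_cons, List.foldl_cons]
    set c := PySem.Dict.getD (PySem.Dict.mk f) "contribution" "" with hc
    by_cases hp : c == "positive"
    · have hne : ¬ (c == "negative") := by simp_all
      have hw : PySem.Dict.getD pvWeight c 0 = 1 := by
        rw [show c = "positive" from by simpa using hp]; rfl
      rw [hw]
      simp only [hp, hne, if_true, Bool.false_eq_true, if_false]
      have := ih (p + 1) n
      linarith [this]
    · by_cases hn : c == "negative"
      · have hw : PySem.Dict.getD pvWeight c 0 = -1 := by
          rw [show c = "negative" from by simpa using hn]; rfl
        rw [hw]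
        simp only [hp, hn, if_true, Bool.false_eq_true, if_false]
        have := ih p (n + 1)
        linarith [this]
      · have hp' : c ≠ "positive" := by simpa using hp
        have hn' : c ≠ "negative" := by simpa using hn
        have h1 : (("positive" : String) == c) = false := beq_eq_false_iff_ne.mpr (Ne.symm hp')
        have h2 : (("negative" : String) == c) = false := beq_eq_false_iff_ne.mpr (Ne.symm hn')
        have hw : PySem.Dict.getD pvWeight c 0 = 0 := by
          simp only [pvWeight, PySem.Dict.getD_eq_get?_getD, PySem.Dict.get?_mk_cons, h1, h2,
                     Bool.false_eq_true, if_false]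
          rfl
        rw [hw]
        simp only [hp, hn, Bool.false_eq_true, if_false]
        have := ih p n
        linarith [this]

-- ===== VERDICT (by name: the statement is the Claim_ definition above) =====
theorem summarize_factors_py_spec : Claim_equal_summarize_factors_py := by
  intro factors _ _
  unfold Spec_summarize_factors_py summarize_factors_py summarize_factors_py_alt
  have h := weights_eq_counts factors 0 0
  simp only [sub_self, zero_add] at h
  simp only [h]
  set P := factors.foldl
    (fun acc f => if PySem.Dict.getD (PySem.Dict.mk f) "contribution" "" == "positive" then acc + 1 else acc) (0 : Int)
  set N := factors.foldl
    (fun acc f => if PySem.Dict.getD (PySem.Dict.mk f) "contribution" "" == "negative" then acc + 1 else acc) (0 : Int)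
  rcases lt_trichotomy P N with h1 | h1 | h1
  · rw [if_neg (by omega), if_pos (by omega), if_neg (show ¬ P - N > 0 by omega),
        if_pos (show P - N < 0 by omega)]
    rfl
  · rw [if_neg (by omega), if_neg (by omega), if_neg (show ¬ P - N > 0 by omega),
        if_neg (show ¬ P - N < 0 by omega)]
    rfl
  · rw [if_pos (by omega), if_pos (show P - N > 0 by omega),
        if_neg (show ¬ P - N < 0 by omega)]
    rfl
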